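-- pv_equiv track=rewrite | github.com/pypi-data/pypi-mirror-368 | packages/zyt-auto-tools/zyt_auto_tools-0.5.0-py3-none-any.whl/zyt_auto_tools/auto_compare.py | build_tree_from_paths
-- ===== SOURCE A (Python) =====
-- def build_tree_from_paths(paths, root_name="root"):
--     """
--     从文件路径列表构建树状结构。
--
--     :param paths: 文件路径列表。
--     :param root_name: 根节点名称。
--     :return: 树状结构字符串。
--     """
--     from collections import defaultdict
--
--     # 构建树结构的嵌套字典
--     tree = lambda: defaultdict(tree)
--     root = tree()
--
--     # 插入路径
--     for path in sorted(paths):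
--         parts = [p for p in path.strip("/").split("/") if p]
--         current = root
--         for part in parts:
--             current = current[part + "/"]
--
--     # 格式化为树状结构字符串
--     def _format_tree(node, prefix=""):
--         """
--         格式化节点为树状结构字符串。
--
--         :param node: 节点。
--         :param prefix: 前缀。
--         :return: 树状结构字符串。
--         """
--         lines = []
--         items = list(node.items())
--         for i, (key, child) in enumerate(items):
--             connector = "└── " if i == len(items) - 1 else "├── "
--             lines.append(prefix + connector + key)
--             if child:
--                 extension = "    " if i == len(items) - 1 else "│   "
--                 lines.extend(_format_tree(child, prefix + extension))
--         return lines
--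
--     # 添加 root 节点
--     return root_name + "\n".join(_format_tree(root))
-- ===== SOURCE B (Python) =====
-- def build_tree_from_paths(paths, root_name="root"):
--     # Build the nested tree with plain dict.setdefault, then format it with an
--     # explicit stack-based DFS (a LIFO worklist of frames) instead of recursion.
--     tree = {}
--     for path in sorted(paths):
--         cur = tree
--         for part in [p for p in path.strip("/").split("/") if p]:
--             cur = cur.setdefault(part + "/", {})
--
--     def frames(prefix, node):
--         items = list(node.items())
--         n = len(items)
--         return [(prefix, k, c, i == n - 1) for i, (k, c) in enumerate(items)]
--
--     lines = []
--     stack = frames("", tree)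
--     stack.reverse()
--     while stack:
--         prefix, key, child, last = stack.pop()
--         lines.append(prefix + ("└── " if last else "├── ") + key)
--         if child:
--             stack.extend(reversed(frames(prefix + ("    " if last else "│   "), child)))
--     return root_name + "\n".join(lines)
-- ===== Notes on version B (the rewrite author's own statement) =====
-- stated objective: alternative
-- what changed: The recursive _format_tree is replaced by an explicit worklist-based DFS that pops (prefix, key, child, isLast) frames and prepends the children's frames, emitting lines iteratively; the tree is built with plain dict.setdefault instead of a recursive defaultdict.
import Mathlib
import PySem

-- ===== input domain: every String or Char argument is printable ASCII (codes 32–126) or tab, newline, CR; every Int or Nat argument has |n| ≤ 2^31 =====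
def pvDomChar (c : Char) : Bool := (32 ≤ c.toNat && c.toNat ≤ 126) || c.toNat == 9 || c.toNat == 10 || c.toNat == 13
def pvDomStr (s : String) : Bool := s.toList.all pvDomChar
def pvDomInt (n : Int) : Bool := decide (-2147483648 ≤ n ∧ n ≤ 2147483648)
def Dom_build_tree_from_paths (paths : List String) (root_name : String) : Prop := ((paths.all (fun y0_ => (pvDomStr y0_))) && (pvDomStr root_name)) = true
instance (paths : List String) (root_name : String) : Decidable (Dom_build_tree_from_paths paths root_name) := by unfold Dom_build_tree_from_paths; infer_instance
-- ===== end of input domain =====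

-- B replaces A's recursive tree formatter by an explicit worklist-based DFS (same cost; objective: alternative decomposition).

-- A nested dict {key: subtree, …} in insertion order, encoded first-child/next-sibling:
-- cons key child restSiblings.
inductive PTree : Type
  | nil : PTree
  | cons : String → PTree → PTree → PTree
deriving DecidableEq, Repr

-- ===== PORT A =====
-- parts = [p for p in path.strip("/").split("/") if p]
def pvPartsA (path : String) : List String :=
  ((PySem.Str.split? (PySem.Str.stripChars path "/") "/").getD []).filter (fun p => p ≠ "")

-- the inner 'for part in parts: current = current[part + "/"]' walk on the nested defaultdict
def pvInsertA : PTree → List String → PTree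
  | t, [] => t
  | PTree.nil, p :: ps => PTree.cons (p ++ "/") (pvInsertA PTree.nil ps) PTree.nil
  | PTree.cons k c r, p :: ps =>
      if k = p ++ "/" then PTree.cons k (pvInsertA c ps) r
      else PTree.cons k c (pvInsertA r (p :: ps))
termination_by t ps => (sizeOf t, ps.length)

-- 'for path in sorted(paths): …'
def pvBuildA (paths : List String) : PTree :=
  (PySem.List.sorted paths (fun x => x) false).foldl
    (fun t path => pvInsertA t (pvPartsA path)) PTree.nil

-- _format_tree: recursion over the sibling list; i == len(items)-1 ↔ no remaining siblings
def pvFmtA : PTree → String → List String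
  | PTree.nil, _ => []
  | PTree.cons k c r, pre =>
      let conn := if r = PTree.nil then "└── " else "├── "
      let line := pre ++ conn ++ k
      let subs := if c ≠ PTree.nil
        then pvFmtA c (pre ++ (if r = PTree.nil then "    " else "│   "))
        else []
      (line :: subs) ++ pvFmtA r pre

def build_tree_from_paths (paths : List String) (root_name : String) : String :=
  root_name ++ PySem.Str.join "\n" (pvFmtA (pvBuildA paths) "")

-- ===== PORT B =====
def pvPartsB (path : String) : List String :=
  ((PySem.Str.split? (PySem.Str.stripChars path "/") "/").getD []).filter (fun p => p ≠ "")

-- cur = cur.setdefault(part + "/", {}) walk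
def pvInsertB : PTree → List String → PTree
  | t, [] => t
  | PTree.nil, p :: ps => PTree.cons (p ++ "/") (pvInsertB PTree.nil ps) PTree.nil
  | PTree.cons k c r, p :: ps =>
      if k = p ++ "/" then PTree.cons k (pvInsertB c ps) r
      else PTree.cons k c (pvInsertB r (p :: ps))
termination_by t ps => (sizeOf t, ps.length)

def pvBuildB (paths : List String) : PTree :=
  (PySem.List.sorted paths (fun x => x) false).foldl
    (fun t path => pvInsertB t (pvPartsB path)) PTree.nil

-- frames(prefix, node): one (prefix, key, child, isLast) frame per entry of the dict
def pvFramesB (pre : String) : PTree → List (String × String × PTree × Bool)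
  | PTree.nil => []
  | PTree.cons k c r => (pre, k, c, r = PTree.nil) :: pvFramesB pre r

-- node-count measures used only for termination of the worklist loop
def pvW : PTree → Nat
  | PTree.nil => 0
  | PTree.cons _ c r => 1 + pvW c + pvW r

def pvWF : List (String × String × PTree × Bool) → Nat
  | [] => 0
  | (_, _, c, _) :: rest => 1 + pvW c + pvWF rest

theorem pvWF_append (a b : List (String × String × PTree × Bool)) :
    pvWF (a ++ b) = pvWF a + pvWF b := by
  induction a with
  | nil => simp [pvWF]
  | cons f rest ih => obtain ⟨p, k, c, l⟩ := f; simp [pvWF, ih]; omega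

theorem pvWF_frames (pre : String) (t : PTree) : pvWF (pvFramesB pre t) = pvW t := by
  induction t generalizing pre with
  | nil => simp [pvFramesB, pvWF, pvW]
  | cons k c r _ ihr => simp [pvFramesB, pvWF, pvW, ihr]

-- the 'while stack:' loop
def pvLoopB : List (String × String × PTree × Bool) → List String
  | [] => []
  | (pre, k, c, last) :: rest =>
      let line := pre ++ (if last then "└── " else "├── ") ++ k
      let rest' := if c ≠ PTree.nil
        then pvFramesB (pre ++ (if last then "    " else "│   ")) c ++ rest
        else rest
      line :: pvLoopB rest'
termination_by fs => pvWF fs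
decreasing_by
  simp only [pvWF]
  split
  · rw [pvWF_append, pvWF_frames]; omega
  · omega

def build_tree_from_paths_alt (paths : List String) (root_name : String) : String :=
  root_name ++ PySem.Str.join "\n" (pvLoopB (pvFramesB "" (pvBuildB paths)))

-- ===== PRECONDITION & SPEC =====
def Spec_build_tree_from_paths (paths : List String) (root_name : String) (out : String) : Prop := out = build_tree_from_paths_alt paths root_name
instance (paths : List String) (root_name : String) (out : String) : Decidable (Spec_build_tree_from_paths paths root_name out) := by unfold Spec_build_tree_from_paths; infer_instance

-- ===== CLAIM (what is proved, stated in full; the proofs are below) =====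
def Claim_equal_build_tree_from_paths : Prop := ∀ (paths : List String) (root_name : String), Dom_build_tree_from_paths paths root_name → Spec_build_tree_from_paths paths root_name (build_tree_from_paths paths root_name)

-- ===== LEMMAS AND PROOFS =====

theorem pvInsert_eq (t : PTree) (ps : List String) : pvInsertB t ps = pvInsertA t ps := by
  fun_induction pvInsertA t ps <;> simp [pvInsertB, *]

theorem pvBuild_eq (paths : List String) : pvBuildB paths = pvBuildA paths := by
  unfold pvBuildA pvBuildB pvPartsA pvPartsB
  simp [pvInsert_eq]

theorem pvLoop_frames (t : PTree) (pre : String) (s : List (String × String × PTree × Bool)) :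
    pvLoopB (pvFramesB pre t ++ s) = pvFmtA t pre ++ pvLoopB s := by
  induction t generalizing pre s with
  | nil => simp [pvFramesB, pvFmtA]
  | cons k c r ihc ihr =>
      by_cases hc : c = PTree.nil
      · subst hc
        simp [pvFramesB, pvFmtA, pvLoopB, ihr]
      · simp [pvFramesB, pvFmtA, pvLoopB, hc, List.append_assoc, ihc, ihr]

-- ===== VERDICT (by name: the statement is the Claim_ definition above) =====
theorem build_tree_from_paths_spec : Claim_equal_build_tree_from_paths := by
  intro paths root_name _
  unfold Spec_build_tree_from_paths build_tree_from_paths build_tree_from_paths_alt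
  rw [pvBuild_eq]
  have h := pvLoop_frames (pvBuildA paths) "" []
  simp [pvLoopB] at h
  rw [h]
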